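-- pv_equiv track=rewrite | github.com/renbran/osuspropertiesv1 | custom_sales/models/sales_analytics.py | _get_chart_colors
-- ===== SOURCE A (Python) =====
-- def _get_chart_colors(count):
--     """Get chart colors based on theme"""
--     # Burgundy, gold, light gold color scheme
--     base_colors = [
--         '#8B0000',  # Burgundy
--         '#FFD700',  # Gold
--         '#F5DEB3',  # Light gold
--         '#B8860B',  # Dark goldenrod
--         '#CD853F',  # Peru
--         '#D2691E',  # Chocolate
--         '#A0522D',  # Sienna
--         '#8B4513',  # Saddle brown
--     ]
--
--     colors = []
--     for i in range(count):
--         colors.append(base_colors[i % len(base_colors)])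
--
--     return colors
-- ===== SOURCE B (Python) =====
-- def _get_chart_colors(count):
--     """Get chart colors based on theme"""
--     # Burgundy, gold, light gold color scheme
--     base_colors = [
--         '#8B0000',  # Burgundy
--         '#FFD700',  # Gold
--         '#F5DEB3',  # Light gold
--         '#B8860B',  # Dark goldenrod
--         '#CD853F',  # Peru
--         '#D2691E',  # Chocolate
--         '#A0522D',  # Sienna
--         '#8B4513',  # Saddle brown
--     ]
--     reps = count // len(base_colors) + 1
--     return (base_colors * reps)[:count]
-- ===== Notes on version B (the rewrite author's own statement) =====
-- stated objective: idiomatic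
-- what changed: Replaced the per-element loop indexing base_colors[i % 8] with whole-list repetition (base_colors * reps) followed by one slice [:count].
import Mathlib
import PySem

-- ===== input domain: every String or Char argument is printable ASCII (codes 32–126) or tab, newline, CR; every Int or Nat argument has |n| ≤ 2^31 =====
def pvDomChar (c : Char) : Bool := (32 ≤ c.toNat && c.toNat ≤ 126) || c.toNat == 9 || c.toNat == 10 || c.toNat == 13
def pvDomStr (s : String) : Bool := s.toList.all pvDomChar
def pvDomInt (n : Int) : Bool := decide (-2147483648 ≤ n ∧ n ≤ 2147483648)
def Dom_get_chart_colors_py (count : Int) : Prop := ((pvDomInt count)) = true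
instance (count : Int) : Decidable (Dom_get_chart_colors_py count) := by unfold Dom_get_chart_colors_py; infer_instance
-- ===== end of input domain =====

-- B replaces A's per-element loop (base[i % 8] for i in range(count)) by whole-list
-- repetition followed by one slice; return values agree for every count.

-- the base_colors literal both Pythons write out verbatim
def pvBaseColors : List String :=
  ["#8B0000", "#FFD700", "#F5DEB3", "#B8860B", "#CD853F", "#D2691E", "#A0522D", "#8B4513"]

-- ===== PORT A =====
-- for i in range(count): colors.append(base_colors[i % len(base_colors)])
-- (the index i % 8 is always in range for i ≥ 0, so pyGetD's default is never used)
def get_chart_colors_py (count : Int) : List String :=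
  (PySem.List.pyRange 0 count 1).foldl
    (fun colors i =>
      colors ++ [PySem.List.pyGetD pvBaseColors (PySem.Int.mod i (pvBaseColors.length : Int)) ""])
    []

-- ===== PORT B =====
-- reps = count // len(base_colors) + 1; return (base_colors * reps)[:count]
def get_chart_colors_py_alt (count : Int) : List String :=
  let reps : Int := PySem.Int.floordiv count (pvBaseColors.length : Int) + 1
  PySem.List.slice (List.flatten (List.replicate reps.toNat pvBaseColors)) none (some count)

-- ===== PRECONDITION & SPEC =====
def Spec_get_chart_colors_py (count : Int) (out : List String) : Prop := out = get_chart_colors_py_alt count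
instance (count : Int) (out : List String) : Decidable (Spec_get_chart_colors_py count out) := by unfold Spec_get_chart_colors_py; infer_instance

-- ===== CLAIM (what is proved, stated in full; the proofs are below) =====
def Claim_equal_get_chart_colors_py : Prop := ∀ (count : Int), Dom_get_chart_colors_py count → Spec_get_chart_colors_py count (get_chart_colors_py count)

-- ===== LEMMAS AND PROOFS =====

-- take n of r copies of the 8-color base is the cycling map, as long as n ≤ 8*r
theorem pv_take_flatten (r : Nat) : ∀ n : Nat, n ≤ 8 * r →
    (List.flatten (List.replicate r pvBaseColors)).take n
      = (List.range n).map (fun k => pvBaseColors.getD (k % 8) "") := by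
  have hl : pvBaseColors.length = 8 := rfl
  induction r with
  | zero => intro n hn; interval_cases n; decide
  | succ r ih =>
    intro n hn
    rw [List.replicate_succ, List.flatten_cons, List.take_append, hl]
    by_cases h8 : n ≤ 8
    · have h0 : (List.flatten (List.replicate r pvBaseColors)).take (n - 8) = [] := by
        have : n - 8 = 0 := by omega
        simp [this]
      rw [h0]
      interval_cases n <;> decide
    · rw [show pvBaseColors.take n = pvBaseColors from
            List.take_of_length_le (by omega),
          ih (n - 8) (by omega)]
      conv_rhs => rw [show n = 8 + (n - 8) by omega, List.range_add, List.map_append]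
      congr 1
      rw [List.map_map]
      apply List.map_congr_left
      intro k _
      simp [Nat.add_mod_left]

theorem get_chart_colors_py_eq_map (count : Int) :
    get_chart_colors_py count
      = (List.range count.toNat).map (fun k => pvBaseColors.getD (k % 8) "") := by
  unfold get_chart_colors_py
  rw [PySem.List.foldl_append_singleton_eq_map, List.nil_append,
      PySem.List.pyRange_one, List.map_map]
  simp only [sub_zero]
  apply List.map_congr_left
  intro k _
  simp only [Function.comp_apply]
  have h : PySem.Int.mod ((0 : Int) + (k : Int)) ((pvBaseColors.length : Nat) : Int)
      = ((k % 8 : Nat) : Int) := by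
    rw [zero_add]; exact PySem.Int.mod_natCast k 8
  rw [h, PySem.List.pyGetD_natCast]

-- ===== VERDICT (by name: the statement is the Claim_ definition above) =====
theorem get_chart_colors_py_spec : Claim_equal_get_chart_colors_py := by
  intro count _
  unfold Spec_get_chart_colors_py get_chart_colors_py_alt
  rw [get_chart_colors_py_eq_map]
  simp only [show ((pvBaseColors.length : Nat) : Int) = 8 from rfl]
  set q : Int := PySem.Int.floordiv count 8 with hq
  obtain ⟨m, hchar, hmlo, hmhi⟩ :
      ∃ m : Int, q * 8 + m = count ∧ 0 ≤ m ∧ m < 8 :=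
    ⟨PySem.Int.mod count 8, PySem.Int.floordiv_mul_add_mod count 8,
     PySem.Int.mod_nonneg count (by norm_num), PySem.Int.mod_lt count (by norm_num)⟩
  by_cases hc : 0 < count
  · rw [PySem.List.slice_to _ (le_of_lt hc)]
    exact (pv_take_flatten (q + 1).toNat count.toNat (by omega)).symm
  · -- count ≤ 0 : both sides are []
    by_cases h0 : count = 0
    · subst h0
      have hqz : q = 0 := by omega
      simp [hqz, PySem.List.slice_to _ (le_refl 0)]
    · have : (q + 1).toNat = 0 := by omega
      rw [this]
      simp [PySem.List.slice]
      omega
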